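-- pv_equiv track=rewrite | github.com/pettarin/fsfs3 | texi2tex.py | fix_quot
-- ===== SOURCE A (Python) =====
-- def fix_quot(s):
--     """ Fix quot in initial-annoucement.texi """
--     lines = s.splitlines()
--     acc = []
--     skip_next = False
--     for line in lines:
--         if line.startswith("@raggedright @smallfonts"):
--             acc.append("\\begin{quot}")
--             skip_next = True
--         else:
--             if skip_next:
--                 skip_next = False
--             else:
--                 acc.append(line)
--     acc2 = []
--     first = True
--     for line in acc:
--         if first:
--             if line.startswith("@end raggedright"):
--                 first = False
--             else:
--                 acc2.append(line)
--         else: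
--             if line.startswith("@end raggedright"):
--                 acc2.append("\\end{quot}")
--             else:
--                 acc2.append(line)
--     return "\n".join(acc2)
-- ===== SOURCE B (Python) =====
-- def fix_quot(s):
--     """ Fix quot in initial-annoucement.texi """
--     out = []
--     skip_next = False
--     seen_first_end = False
--     for line in s.splitlines():
--         if line.startswith("@raggedright @smallfonts"):
--             tok = "\\begin{quot}"
--             skip_next = True
--         elif skip_next:
--             skip_next = False
--             continue
--         else:
--             tok = line
--         if tok.startswith("@end raggedright"):
--             if seen_first_end:
--                 out.append("\\end{quot}")
--             else:
--                 seen_first_end = True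
--         else:
--             out.append(tok)
--     return "\n".join(out)
-- ===== Notes on version B (the rewrite author's own statement) =====
-- stated objective: alternative
-- what changed: Fused A's two list passes (build acc, then rewrite acc) into a single left-to-right loop over the lines driven by two state flags (skip_next, seen_first_end), emitting output directly with no intermediate list.
import Mathlib
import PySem

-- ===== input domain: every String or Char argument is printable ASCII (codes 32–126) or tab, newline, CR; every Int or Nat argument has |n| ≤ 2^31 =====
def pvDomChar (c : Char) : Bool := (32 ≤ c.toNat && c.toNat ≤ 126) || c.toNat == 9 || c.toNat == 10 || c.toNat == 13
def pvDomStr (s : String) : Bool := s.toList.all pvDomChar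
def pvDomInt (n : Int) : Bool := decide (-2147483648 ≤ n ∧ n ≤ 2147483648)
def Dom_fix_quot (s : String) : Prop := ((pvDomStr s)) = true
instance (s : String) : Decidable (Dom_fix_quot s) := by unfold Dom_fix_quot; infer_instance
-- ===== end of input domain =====

-- B fuses A's two passes into one stateful loop; objective: alternative decomposition (same cost).

-- ===== PORT A =====
-- pass 1: drop the line after each "@raggedright @smallfonts" marker, replacing the marker
def pass1A : List String → Bool → List String
  | [], _ => []
  | l :: ls, skip =>
    if PySem.Str.startswith l "@raggedright @smallfonts" then
      "\\begin{quot}" :: pass1A ls true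
    else
      if skip then pass1A ls false else l :: pass1A ls false

-- pass 2: drop the first "@end raggedright", turn later ones into "\end{quot}"
def pass2A : List String → Bool → List String
  | [], _ => []
  | l :: ls, first =>
    if first then
      if PySem.Str.startswith l "@end raggedright" then pass2A ls false
      else l :: pass2A ls true
    else
      if PySem.Str.startswith l "@end raggedright" then "\\end{quot}" :: pass2A ls false
      else l :: pass2A ls false

def fix_quot (s : String) : String :=
  PySem.Str.join "\n" (pass2A (pass1A (PySem.Str.splitlines s) false) true)

-- ===== PORT B =====
-- single pass, state = (skip_next, seen_first_end); tok is the pass-1 output fed straight to the pass-2 stage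
def loopB : List String → Bool → Bool → List String
  | [], _, _ => []
  | l :: ls, skip, seen =>
    if PySem.Str.startswith l "@raggedright @smallfonts" then
      if PySem.Str.startswith "\\begin{quot}" "@end raggedright" then
        (if seen then "\\end{quot}" :: loopB ls true true else loopB ls true true)
      else "\\begin{quot}" :: loopB ls true seen
    else if skip then loopB ls false seen
    else
      if PySem.Str.startswith l "@end raggedright" then
        (if seen then "\\end{quot}" :: loopB ls false true else loopB ls false true)
      else l :: loopB ls false seen

def fix_quot_alt (s : String) : String :=
  PySem.Str.join "\n" (loopB (PySem.Str.splitlines s) false false)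

-- ===== PRECONDITION & SPEC =====
def Spec_fix_quot (s : String) (out : String) : Prop := out = fix_quot_alt s
instance (s : String) (out : String) : Decidable (Spec_fix_quot s out) := by unfold Spec_fix_quot; infer_instance

-- ===== CLAIM (what is proved, stated in full; the proofs are below) =====
def Claim_equal_fix_quot : Prop := ∀ (s : String), Dom_fix_quot s → Spec_fix_quot s (fix_quot s)

-- ===== LEMMAS AND PROOFS =====
theorem startswith_bq : PySem.Str.startswith "\\begin{quot}" "@end raggedright" = false := by decide

theorem loopB_eq_passes : ∀ (ls : List String) (skip first : Bool),
    pass2A (pass1A ls skip) first = loopB ls skip (!first) := by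
  intro ls
  induction ls with
  | nil => intro skip first; rfl
  | cons l ls ih =>
    intro skip first
    show pass2A (if PySem.Str.startswith l "@raggedright @smallfonts" then
      "\\begin{quot}" :: pass1A ls true
    else
      if skip then pass1A ls false else l :: pass1A ls false) first = _
    conv_rhs => rw [loopB]
    by_cases h1 : PySem.Str.startswith l "@raggedright @smallfonts" = true
    · rw [if_pos h1, if_pos h1]
      cases first <;>
        simp only [pass2A, startswith_bq, Bool.false_eq_true, ite_false, ite_true, Bool.not_false, Bool.not_true, ih]
    · rw [if_neg h1, if_neg h1]
      by_cases h2 : skip = true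
      · rw [if_pos h2, if_pos h2]; exact ih false first
      · rw [if_neg h2, if_neg h2]
        by_cases h3 : PySem.Str.startswith l "@end raggedright" = true
        · cases first <;>
            simp only [pass2A, if_pos h3, Bool.false_eq_true, ite_false, ite_true,
              Bool.not_false, Bool.not_true, ih]
        · cases first <;>
            simp only [pass2A, if_neg h3, Bool.false_eq_true, ite_false, ite_true,
              Bool.not_false, Bool.not_true, ih]

-- ===== VERDICT (by name: the statement is the Claim_ definition above) =====
theorem fix_quot_spec : Claim_equal_fix_quot := by
  intro s _
  unfold Spec_fix_quot fix_quot fix_quot_alt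
  rw [loopB_eq_passes, Bool.not_true]
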